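-- pv_equiv track=rewrite | github.com/RaiderDBrown/HomeProjects | FantasyFootball/DraftersSimulation_preload.py | flex_at_end
-- ===== SOURCE A (Python) =====
-- def flex_at_end(strategy):
--     # Find the index of the first occurrence of 'FLX' (if any)
--     flex_indices = (i for i, pos in enumerate(strategy) if 'FLX' in pos)
--     first_flex_index = next((flex_indices), -1)
--     if first_flex_index > -1:
--         # Check that all subsequent elements are also 'FLX'
--         for i in range(first_flex_index, len(strategy)):
--             if 'FLX' not in strategy[i]:
--                 return False
--     else:
--         return True  # if no flex elements
--     return True  # if only one Flex element
-- ===== SOURCE B (Python) =====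
-- def flex_at_end(strategy):
--     flags = ['FLX' in pos for pos in strategy]
--     return flags == sorted(flags)
-- ===== Notes on version B (the rewrite author's own statement) =====
-- stated objective: idiomatic
-- what changed: Replaces A's find-first-FLX-index-then-scan-forward loop with mapping each position to a boolean FLX flag and checking the flag list equals its sorted order (False < True means all FLX positions form a suffix).
import Mathlib
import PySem

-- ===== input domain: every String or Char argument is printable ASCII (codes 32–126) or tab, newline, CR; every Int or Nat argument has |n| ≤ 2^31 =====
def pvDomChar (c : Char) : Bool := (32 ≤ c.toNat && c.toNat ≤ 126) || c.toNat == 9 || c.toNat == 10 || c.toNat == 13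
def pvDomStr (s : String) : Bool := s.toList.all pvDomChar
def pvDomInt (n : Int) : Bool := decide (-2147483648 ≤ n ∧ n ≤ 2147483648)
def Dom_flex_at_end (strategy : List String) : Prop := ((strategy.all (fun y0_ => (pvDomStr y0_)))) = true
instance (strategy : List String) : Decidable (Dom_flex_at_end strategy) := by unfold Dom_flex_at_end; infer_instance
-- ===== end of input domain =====

-- B replaces A's find-first-FLX-index-then-scan-forward loop by comparing the FLX-flag list with its sorted order (idiomatic).

-- ===== PORT A =====
def flex_at_end (strategy : List String) : Bool :=
  -- first_flex_index = next((i for i, pos in enumerate(strategy) if 'FLX' in pos), -1)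
  let firstFlexIndex : Int :=
    (((PySem.List.enumerate strategy 0).find? (fun p => PySem.Str.isIn "FLX" p.2)).map Prod.fst).getD (-1)
  if firstFlexIndex > -1 then
    -- 'for i in range(first_flex_index, len(strategy)): if 'FLX' not in strategy[i]: return False'
    (PySem.List.pyRange firstFlexIndex (strategy.length : Int) 1).all
      (fun i => PySem.Str.isIn "FLX" (PySem.List.pyGetD strategy i ""))
  else true

-- ===== PORT B =====
def flex_at_end_alt (strategy : List String) : Bool :=
  let flags := strategy.map (fun pos => PySem.Str.isIn "FLX" pos)
  flags == PySem.List.sorted flags (fun x => x) false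

-- ===== PRECONDITION & SPEC =====
def Spec_flex_at_end (strategy : List String) (out : Bool) : Prop := out = flex_at_end_alt strategy
instance (strategy : List String) (out : Bool) : Decidable (Spec_flex_at_end strategy out) := by unfold Spec_flex_at_end; infer_instance

-- ===== CLAIM (what is proved, stated in full; the proofs are below) =====
def Claim_equal_flex_at_end : Prop := ∀ (strategy : List String), Dom_flex_at_end strategy → Spec_flex_at_end strategy (flex_at_end strategy)

-- ===== LEMMAS AND PROOFS =====

-- proof-side recursive form: 'from the first FLX element on, everything is FLX'
def pvSuffixChk (f : String → Bool) : List String → Bool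
  | [] => true
  | x :: xs => if f x then (x :: xs).all f else pvSuffixChk f xs

-- the first component of A's 'next(...)' generator is findIdx?
theorem pvEnumFind (f : String → Bool) : ∀ (xs : List String) (s : Nat),
    ((PySem.List.enumerate xs (s : Int)).find? (fun p => f p.2)).map Prod.fst
      = (xs.findIdx? f).map (fun n => ((s + n : Nat) : Int)) := by
  intro xs
  induction xs with
  | nil => intro s; simp [PySem.List.enumerate_nil]
  | cons x xs ih =>
    intro s
    rw [PySem.List.enumerate_cons]
    by_cases hx : f x
    · simp [List.find?, hx, List.findIdx?_cons]
    · have h1 : ((s : Int) + 1) = ((s + 1 : Nat) : Int) := by push_cast; ring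
      simp only [List.find?, hx, List.findIdx?_cons, h1, ih (s + 1)]
      cases List.findIdx? f xs with
      | none => simp
      | some n => simp; ring

-- A's value equals the recursive suffix check
theorem pvA_eq_chk (xs : List String) :
    flex_at_end xs = pvSuffixChk (fun s => PySem.Str.isIn "FLX" s) xs := by
  set f : String → Bool := fun s => PySem.Str.isIn "FLX" s with hf
  have key : ∀ (ys : List String),
      (match ys.findIdx? f with
        | some n => (ys.drop n).all f
        | none => true) = pvSuffixChk f ys := by
    intro ys
    induction ys with
    | nil => simp [pvSuffixChk]
    | cons y ys ih =>
      by_cases hy : f y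
      · simp [List.findIdx?_cons, hy, pvSuffixChk]
      · simp only [List.findIdx?_cons, hy, Bool.false_eq_true, if_false, pvSuffixChk, ← ih]
        cases ys.findIdx? f <;> simp
  have henum := pvEnumFind f xs 0
  simp only [Nat.cast_zero, Nat.zero_add] at henum
  unfold flex_at_end
  rw [← key xs, henum]
  cases h2 : xs.findIdx? f with
  | none => simp
  | some n =>
    simp only [Option.map_some, Option.getD_some]
    rw [if_pos (show ((n : Nat) : Int) > -1 by omega)]
    have hall : ((PySem.List.pyRange ((n : Nat) : Int) (xs.length : Int) 1).map
        (fun i => PySem.List.pyGetD xs i "")).all f = (xs.drop n).all f := by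
      rw [PySem.List.map_pyGetD_pyRange' xs "" (by omega)]
      simp
    rw [← hall, List.all_map]
    simp [hf, Function.comp_def, PySem.Str.isIn]

-- the flag list is pairwise-≤ (i.e. already in sorted order) iff the suffix check holds
theorem pvPairwise_eq_chk (f : String → Bool) : ∀ (xs : List String),
    decide ((xs.map f).Pairwise (· ≤ ·)) = pvSuffixChk f xs := by
  intro xs
  induction xs with
  | nil => simp [pvSuffixChk]
  | cons x xs ih =>
    by_cases hx : f x
    · simp only [pvSuffixChk, hx, if_pos, List.map_cons, List.pairwise_cons]
      by_cases hall : ∀ y ∈ xs, f y = true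
      · have h1 : (xs.map f).Pairwise (· ≤ ·) := by
          apply List.Pairwise.imp_of_mem (l := xs.map f) (R := fun _ _ => True)
          · intro a b ha hb _
            rcases List.mem_map.mp hb with ⟨y, hy, rfl⟩
            simp [hall y hy]
          · exact List.pairwise_of_forall (fun _ _ => trivial)
        have h2 : ∀ b ∈ xs.map f, true ≤ b := by
          intro b hb; rcases List.mem_map.mp hb with ⟨y, hy, rfl⟩; simp [hall y hy]
        have h3 : (x :: xs).all f = true := by
          rw [List.all_cons, hx, Bool.true_and, List.all_eq_true]; exact hall
        rw [h3, decide_eq_true ⟨h2, h1⟩]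
      · rcases not_forall.mp hall with ⟨y, hy⟩
        rcases Classical.not_imp.mp hy with ⟨hymem, hyf⟩
        have hL : ¬ ((∀ b ∈ xs.map f, true ≤ b) ∧ (xs.map f).Pairwise (· ≤ ·)) := by
          rintro ⟨h2, _⟩
          have hle := h2 (f y) (List.mem_map.mpr ⟨y, hymem, rfl⟩)
          rw [Bool.eq_false_iff.mpr hyf] at hle
          exact absurd hle (by decide)
        have hR : (x :: xs).all f = false := by
          rw [List.all_eq_false]
          exact ⟨y, List.mem_cons_of_mem _ hymem, hyf⟩
        rw [hR, decide_eq_false hL]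
    · simp only [pvSuffixChk, hx, Bool.false_eq_true, if_false, ← ih, List.map_cons,
        List.pairwise_cons, decide_eq_decide]
      constructor
      · rintro ⟨_, h⟩; exact h
      · intro h
        refine ⟨?_, h⟩
        intro b _
        exact Bool.false_le b

-- B's value equals the suffix check
theorem pvB_eq_chk (xs : List String) :
    flex_at_end_alt xs = pvSuffixChk (fun s => PySem.Str.isIn "FLX" s) xs := by
  set f : String → Bool := fun s => PySem.Str.isIn "FLX" s with hf
  rw [← pvPairwise_eq_chk f xs]
  show ((xs.map f) == PySem.List.sorted (xs.map f) (fun x => x) false)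
      = decide ((xs.map f).Pairwise (· ≤ ·))
  set flags := xs.map f with hflags
  by_cases h : flags.Pairwise (· ≤ ·)
  · rw [PySem.List.sorted_eq_self_of_pairwise flags (fun x => x) h, decide_eq_true h]
    simp
  · have hne : flags ≠ PySem.List.sorted flags (fun x => x) false := by
      intro heq
      exact h (by rw [heq]; exact PySem.List.sorted_pairwise flags (fun x => x))
    rw [decide_eq_false h]
    exact beq_eq_false_iff_ne.mpr hne

-- ===== VERDICT (by name: the statement is the Claim_ definition above) =====
theorem flex_at_end_spec : Claim_equal_flex_at_end := by
  intro strategy _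
  unfold Spec_flex_at_end
  rw [pvA_eq_chk, pvB_eq_chk]
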